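-- pv_equiv track=rewrite | github.com/ghiaog123/git_exa | main.py | find_same_basket
-- ===== SOURCE A (Python) =====
-- def find_same_basket(baskets_frequent_items_appear, s):
--     same_basket = []
--     for i in baskets_frequent_items_appear.keys():
--         for j in baskets_frequent_items_appear.keys():
--             if i < j:
--                 a = len( set(baskets_frequent_items_appear[i])&set(baskets_frequent_items_appear[j]))
--                 if a >= s:
--                     same_basket.append([i,j,a])
--     return same_basket
-- ===== SOURCE B (Python) =====
-- def find_same_basket(baskets_frequent_items_appear, s):
--     # Inverted index: item -> baskets containing it; count shared distinct
--     # items only for pairs that actually share an item, then emit in A's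
--     # pair order with a cheap dict lookup instead of per-pair set building.
--     keys = list(baskets_frequent_items_appear.keys())
--     occ = {}          # item -> list of keys whose basket contains it
--     pair_count = {}   # (i, j) with i < j -> number of shared distinct items
--     for k in keys:
--         for x in dict.fromkeys(baskets_frequent_items_appear[k]):
--             for k2 in occ.get(x, []):
--                 p = (k2, k) if k2 < k else (k, k2)
--                 pair_count[p] = pair_count.get(p, 0) + 1
--             occ.setdefault(x, []).append(k)
--     out = []
--     for i in keys:
--         for j in keys:
--             if i < j:
--                 a = pair_count.get((i, j), 0)
--                 if a >= s:
--                     out.append([i, j, a])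
--     return out
-- ===== Notes on version B (the rewrite author's own statement) =====
-- stated objective: alternative
-- what changed: Replaces the all-pairs set-intersection scan by an inverted index item->baskets that counts each pair's shared distinct items, then emits pairs in A's order via dict lookups.
import Mathlib
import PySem

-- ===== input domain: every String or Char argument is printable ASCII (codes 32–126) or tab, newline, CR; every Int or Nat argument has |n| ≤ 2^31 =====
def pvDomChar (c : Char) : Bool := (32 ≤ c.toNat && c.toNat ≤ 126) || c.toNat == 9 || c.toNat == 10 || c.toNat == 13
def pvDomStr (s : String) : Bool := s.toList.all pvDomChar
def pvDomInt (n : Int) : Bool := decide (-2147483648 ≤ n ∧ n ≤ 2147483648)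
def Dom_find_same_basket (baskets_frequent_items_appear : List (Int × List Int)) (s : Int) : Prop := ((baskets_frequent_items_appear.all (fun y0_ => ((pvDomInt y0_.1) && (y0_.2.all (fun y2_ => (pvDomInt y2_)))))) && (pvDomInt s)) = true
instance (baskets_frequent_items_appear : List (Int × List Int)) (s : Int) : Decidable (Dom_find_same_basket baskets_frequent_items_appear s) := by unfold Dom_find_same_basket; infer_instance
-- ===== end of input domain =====

-- B replaces the all-pairs set-intersection scan by an inverted index (item → baskets) that
-- counts shared distinct items per pair, then emits in A's pair order (alternative algorithm).


-- ===== PORT A =====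
-- dict b, first binding wins: b[k] is the first-match lookup, keys() the first-occurrence dedup
def pvVal (b : List (Int × List Int)) (k : Int) : List Int :=
  (PySem.Dict.mk b).getD k []

def find_same_basket (baskets_frequent_items_appear : List (Int × List Int)) (s : Int) : List (List Int) :=
  let ks := PySem.List.dedup (baskets_frequent_items_appear.map Prod.fst)
  ks.foldl (fun same_basket i =>
    ks.foldl (fun same_basket j =>
      if i < j then
        let a : Int := ((PySem.Set.inter (PySem.Set.ofList (pvVal baskets_frequent_items_appear i))
                          (PySem.Set.ofList (pvVal baskets_frequent_items_appear j))).length : Int)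
        if a ≥ s then same_basket ++ [[i, j, a]] else same_basket
      else same_basket) same_basket) []

-- ===== PORT B =====
-- one build step: item x of basket k — bump every pair (earlier basket containing x, k), then record k under x
def pvStepItem (k : Int) (st : PySem.Dict Int (List Int) × PySem.Dict (Int × Int) Int) (x : Int) :
    PySem.Dict Int (List Int) × PySem.Dict (Int × Int) Int :=
  let pc := (st.1.getD x []).foldl
      (fun pc k2 => pc.modify (if k2 < k then (k2, k) else (k, k2)) 0 (· + 1)) st.2
  (st.1.modify x [] (· ++ [k]), pc)

def find_same_basket_alt (baskets_frequent_items_appear : List (Int × List Int)) (s : Int) : List (List Int) :=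
  let ks := PySem.List.dedup (baskets_frequent_items_appear.map Prod.fst)
  let st := ks.foldl (fun st k =>
      (PySem.List.dedup (pvVal baskets_frequent_items_appear k)).foldl (pvStepItem k) st)
    (PySem.Dict.empty, PySem.Dict.empty)
  ks.foldl (fun out i =>
    ks.foldl (fun out j =>
      if i < j then
        let a := st.2.getD (i, j) 0
        if a ≥ s then out ++ [[i, j, a]] else out
      else out) out) []

-- ===== PRECONDITION & SPEC =====
def Spec_find_same_basket (baskets_frequent_items_appear : List (Int × List Int)) (s : Int) (out : List (List Int)) : Prop := out = find_same_basket_alt baskets_frequent_items_appear s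
instance (baskets_frequent_items_appear : List (Int × List Int)) (s : Int) (out : List (List Int)) : Decidable (Spec_find_same_basket baskets_frequent_items_appear s out) := by unfold Spec_find_same_basket; infer_instance

-- ===== CLAIM (what is proved, stated in full; the proofs are below) =====
def Claim_equal_find_same_basket : Prop := ∀ (baskets_frequent_items_appear : List (Int × List Int)) (s : Int), Dom_find_same_basket baskets_frequent_items_appear s → Spec_find_same_basket baskets_frequent_items_appear s (find_same_basket baskets_frequent_items_appear s)

-- ===== LEMMAS AND PROOFS =====

-- number of distinct items common to baskets i and j
def pvC (b : List (Int × List Int)) (i j : Int) : Int :=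
  ((PySem.List.dedup (pvVal b i)).countP (fun x => decide (x ∈ pvVal b j)) : Int)

theorem pv_nodup_length_eq {xs ys : List Int} (hx : xs.Nodup) (hy : ys.Nodup)
    (h : ∀ a, a ∈ xs ↔ a ∈ ys) : xs.length = ys.length :=
  (((List.perm_ext_iff_of_nodup hx hy).2 h)).length_eq

theorem pvC_comm (b : List (Int × List Int)) (i j : Int) : pvC b i j = pvC b j i := by
  unfold pvC
  congr 1
  rw [List.countP_eq_length_filter, List.countP_eq_length_filter]
  refine pv_nodup_length_eq
    (List.Nodup.filter _ (PySem.List.nodup_dedup (pvVal b i)))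
    (List.Nodup.filter _ (PySem.List.nodup_dedup (pvVal b j)))
    (fun a => ?_)
  simp only [List.mem_filter, PySem.List.mem_dedup, decide_eq_true_eq]
  tauto

-- A's per-pair value is pvC
theorem pv_inter_len (b : List (Int × List Int)) (i j : Int) :
    ((PySem.Set.inter (PySem.Set.ofList (pvVal b i)) (PySem.Set.ofList (pvVal b j))).length : Int)
      = pvC b i j := by
  unfold pvC
  congr 1
  rw [List.countP_eq_length_filter]
  refine pv_nodup_length_eq
    (PySem.Set.nodup_inter _ _ (PySem.Set.nodup_ofList _))
    (List.Nodup.filter _ (PySem.List.nodup_dedup (pvVal b i)))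
    (fun a => ?_)
  simp [PySem.Set.mem_inter, PySem.Set.mem_ofList, List.mem_filter]

-- invariant value of the pair-count dict after processing keys `done` and, within the
-- current key k, the item prefix `ys`
def pvPC (b : List (Int × List Int)) (done : List Int) (k : Int) (ys : List Int)
    (p : Int × Int) : Int :=
  if p.1 ∈ done ∧ p.2 ∈ done ∧ p.1 < p.2 then pvC b p.1 p.2
  else if p.1 ∈ done ∧ p.2 = k ∧ p.1 < k then (ys.countP (fun x => decide (x ∈ pvVal b p.1)) : Int)
  else if p.1 = k ∧ p.2 ∈ done ∧ k < p.2 then (ys.countP (fun x => decide (x ∈ pvVal b p.2)) : Int)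
  else 0

def pvInv (b : List (Int × List Int)) (done : List Int)
    (st : PySem.Dict Int (List Int) × PySem.Dict (Int × Int) Int) : Prop :=
  (∀ x, st.1.getD x [] = done.filter (fun t => decide (x ∈ pvVal b t)))
  ∧ (∀ p : Int × Int, st.2.getD p 0 =
      if p.1 ∈ done ∧ p.2 ∈ done ∧ p.1 < p.2 then pvC b p.1 p.2 else 0)

-- the bump loop adds 1 at key `pair k2` for each k2 in L
theorem pv_bump (L : List Int) (k : Int) (pc : PySem.Dict (Int × Int) Int) (p : Int × Int) :
    (L.foldl (fun pc k2 => pc.modify (if k2 < k then (k2, k) else (k, k2)) 0 (· + 1)) pc).getD p 0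
      = pc.getD p 0 + ((L.map (fun k2 => if k2 < k then (k2, k) else (k, k2))).count p : Int) := by
  induction L generalizing pc with
  | nil => simp
  | cons a L ih =>
    rw [List.foldl_cons, ih, PySem.Dict.getD_modify, List.map_cons, List.count_cons]
    by_cases h : p = (if a < k then (a, k) else (k, a))
    · subst h
      rw [if_pos rfl, if_pos (show ((if a < k then ((a:Int), (k:Int)) else ((k:Int), (a:Int))) == (if a < k then ((a:Int), (k:Int)) else ((k:Int), (a:Int)))) = true by simp)]
      push_cast; ring
    · rw [if_neg h, if_neg (show ¬ ((if a < k then ((a:Int), (k:Int)) else ((k:Int), (a:Int))) == p) = true by simpa using (Ne.symm h))]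
      push_cast; ring

theorem pv_count_pair (L : List Int) (k : Int) (hL : L.Nodup) (hk : k ∉ L) (p1 p2 : Int) :
    ((L.map (fun k2 => if k2 < k then (k2, k) else (k, k2))).count (p1, p2) : Int)
      = if (p2 = k ∧ p1 ∈ L ∧ p1 < k) ∨ (p1 = k ∧ p2 ∈ L ∧ k < p2) then 1 else 0 := by
  induction L with
  | nil => simp
  | cons a L ih =>
    obtain ⟨ha, hL'⟩ := List.nodup_cons.1 hL
    have hka : k ≠ a := fun e => hk (by simp [e])
    have hk' : k ∉ L := fun h => hk (by simp [h])
    rw [List.map_cons, List.count_cons]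
    push_cast
    rw [ih hL' hk']
    by_cases hak : a < k
    · rw [if_pos hak]
      by_cases hpa : (p1, p2) = ((a : Int), (k : Int))
      · have e1 : p1 = a := (Prod.mk.injEq .. ▸ hpa).1
        have e2 : p2 = k := (Prod.mk.injEq .. ▸ hpa).2
        rw [if_neg (show ¬((p2 = k ∧ p1 ∈ L ∧ p1 < k) ∨ (p1 = k ∧ p2 ∈ L ∧ k < p2)) by
              rintro (⟨_, hm, _⟩|⟨e, _, _⟩)
              · exact ha (by rwa [e1] at hm)
              · exact hka (show k = a by rw [← e1, ← e]).symm.symm),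
            if_pos (show (p2 = k ∧ p1 ∈ a :: L ∧ p1 < k) ∨ (p1 = k ∧ p2 ∈ a :: L ∧ k < p2) from
              Or.inl ⟨e2, by simp [e1], by rw [e1]; exact hak⟩),
            if_pos (show ((((a:Int), (k:Int))) == (p1, p2)) = true by simp [e1, e2])]
        norm_num
      · have hiff : ((p2 = k ∧ p1 ∈ a :: L ∧ p1 < k) ∨ (p1 = k ∧ p2 ∈ a :: L ∧ k < p2))
            ↔ ((p2 = k ∧ p1 ∈ L ∧ p1 < k) ∨ (p1 = k ∧ p2 ∈ L ∧ k < p2)) := by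
          simp only [List.mem_cons]
          constructor
          · rintro (⟨e, (h|h), l⟩|⟨e, (h|h), l⟩)
            · exact absurd (by rw [h, e]) hpa
            · exact Or.inl ⟨e, h, l⟩
            · omega
            · exact Or.inr ⟨e, h, l⟩
          · rintro (⟨e, h, l⟩|⟨e, h, l⟩)
            · exact Or.inl ⟨e, Or.inr h, l⟩
            · exact Or.inr ⟨e, Or.inr h, l⟩
        rw [if_congr hiff rfl rfl,
            if_neg (show ¬((((a:Int), (k:Int))) == (p1, p2)) = true by
              simpa using (Ne.symm hpa))]
        ring
    · rw [if_neg hak]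
      have hka' : k < a := by omega
      by_cases hpa : (p1, p2) = ((k : Int), (a : Int))
      · have e1 : p1 = k := (Prod.mk.injEq .. ▸ hpa).1
        have e2 : p2 = a := (Prod.mk.injEq .. ▸ hpa).2
        rw [if_neg (show ¬((p2 = k ∧ p1 ∈ L ∧ p1 < k) ∨ (p1 = k ∧ p2 ∈ L ∧ k < p2)) by
              rintro (⟨e, _, _⟩|⟨_, hm, _⟩)
              · exact hka (show k = a by rw [← e2, ← e])
              · exact ha (by rwa [e2] at hm)),
            if_pos (show (p2 = k ∧ p1 ∈ a :: L ∧ p1 < k) ∨ (p1 = k ∧ p2 ∈ a :: L ∧ k < p2) from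
              Or.inr ⟨e1, by simp [e2], by rw [e2]; exact hka'⟩),
            if_pos (show ((((k:Int), (a:Int))) == (p1, p2)) = true by simp [e1, e2])]
        norm_num
      · have hiff : ((p2 = k ∧ p1 ∈ a :: L ∧ p1 < k) ∨ (p1 = k ∧ p2 ∈ a :: L ∧ k < p2))
            ↔ ((p2 = k ∧ p1 ∈ L ∧ p1 < k) ∨ (p1 = k ∧ p2 ∈ L ∧ k < p2)) := by
          simp only [List.mem_cons]
          constructor
          · rintro (⟨e, (h|h), l⟩|⟨e, (h|h), l⟩)
            · omega
            · exact Or.inl ⟨e, h, l⟩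
            · exact absurd (by rw [e, h]) hpa
            · exact Or.inr ⟨e, h, l⟩
          · rintro (⟨e, h, l⟩|⟨e, h, l⟩)
            · exact Or.inl ⟨e, Or.inr h, l⟩
            · exact Or.inr ⟨e, Or.inr h, l⟩
        rw [if_congr hiff rfl rfl,
            if_neg (show ¬((((k:Int), (a:Int))) == (p1, p2)) = true by
              simpa using (Ne.symm hpa))]
        ring

-- inner invariant: keys `done` fully processed, items `ys` of the current key k processed
def pvInnerInv (b : List (Int × List Int)) (done : List Int) (k : Int) (ys : List Int)
    (st : PySem.Dict Int (List Int) × PySem.Dict (Int × Int) Int) : Prop :=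
  (∀ x, st.1.getD x [] = done.filter (fun t => decide (x ∈ pvVal b t))
        ++ (if x ∈ ys then [k] else []))
  ∧ (∀ p : Int × Int, st.2.getD p 0 = pvPC b done k ys p)

theorem pv_step_item (b : List (Int × List Int)) (done : List Int) (k x : Int) (ys : List Int)
    (st : PySem.Dict Int (List Int) × PySem.Dict (Int × Int) Int)
    (hd : done.Nodup) (hk : k ∉ done) (hx : x ∉ ys)
    (h : pvInnerInv b done k ys st) :
    pvInnerInv b done k (ys ++ [x]) (pvStepItem k st x) := by
  obtain ⟨h1, h2⟩ := h
  have hLx : st.1.getD x [] = done.filter (fun t => decide (x ∈ pvVal b t)) := by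
    rw [h1 x, if_neg hx, List.append_nil]
  constructor
  · intro y
    show (st.1.modify x [] (· ++ [k])).getD y [] = _
    rw [PySem.Dict.getD_modify]
    by_cases hyx : y = x
    · rw [if_pos hyx, hyx, hLx, if_pos (by simp)]
    · rw [if_neg hyx, h1 y, if_congr (show y ∈ ys ↔ y ∈ ys ++ [x] by simp [hyx]) rfl rfl]
  · intro p
    show ((st.1.getD x []).foldl _ st.2).getD p 0 = _
    obtain ⟨p1, p2⟩ := p
    rw [pv_bump, h2 (p1, p2), hLx,
        pv_count_pair _ _ (hd.filter _) (fun hmem => hk (List.mem_of_mem_filter hmem)) p1 p2]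
    have hmemL : ∀ q : Int, q ∈ done.filter (fun t => decide (x ∈ pvVal b t))
        ↔ (q ∈ done ∧ x ∈ pvVal b q) := by
      intro q; simp [List.mem_filter]
    simp only [hmemL]
    unfold pvPC
    by_cases c1 : p1 ∈ done ∧ p2 ∈ done ∧ p1 < p2
    · rw [if_pos c1, if_pos c1,
         if_neg (by rintro (⟨e,_,_⟩|⟨e,_,_⟩) <;> [exact hk (e ▸ c1.2.1); exact hk (e ▸ c1.1)])]
      ring
    · rw [if_neg c1, if_neg c1]
      by_cases c2 : p1 ∈ done ∧ p2 = k ∧ p1 < k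
      · rw [if_pos c2, if_pos c2, List.countP_append]
        have hiff : ((p2 = k ∧ (p1 ∈ done ∧ x ∈ pvVal b p1) ∧ p1 < k)
             ∨ (p1 = k ∧ (p2 ∈ done ∧ x ∈ pvVal b p2) ∧ k < p2))
            ↔ (x ∈ pvVal b p1) := by
          constructor
          · rintro (⟨_,⟨_,hxv⟩,_⟩|⟨_,_,l⟩)
            · exact hxv
            · exact absurd l (by rw [c2.2.1]; exact lt_irrefl k)
          · intro hxv; exact Or.inl ⟨c2.2.1, ⟨c2.1, hxv⟩, c2.2.2⟩
        rw [if_congr hiff rfl rfl]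
        by_cases hxv : x ∈ pvVal b p1
        · rw [if_pos hxv]; simp [hxv]
        · rw [if_neg hxv]; simp [hxv]
      · rw [if_neg c2, if_neg c2]
        by_cases c3 : p1 = k ∧ p2 ∈ done ∧ k < p2
        · rw [if_pos c3, if_pos c3, List.countP_append]
          have hiff : ((p2 = k ∧ (p1 ∈ done ∧ x ∈ pvVal b p1) ∧ p1 < k)
               ∨ (p1 = k ∧ (p2 ∈ done ∧ x ∈ pvVal b p2) ∧ k < p2))
              ↔ (x ∈ pvVal b p2) := by
            constructor
            · rintro (⟨_,_,l⟩|⟨_,⟨_,hxv⟩,_⟩)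
              · exact absurd l (by rw [c3.1]; exact lt_irrefl k)
              · exact hxv
            · intro hxv; exact Or.inr ⟨c3.1, ⟨c3.2.1, hxv⟩, c3.2.2⟩
          rw [if_congr hiff rfl rfl]
          by_cases hxv : x ∈ pvVal b p2
          · rw [if_pos hxv]; simp [hxv]
          · rw [if_neg hxv]; simp [hxv]
        · rw [if_neg c3, if_neg c3,
              if_neg (by rintro (⟨e,⟨hm,_⟩,l⟩|⟨e,⟨hm,_⟩,l⟩) <;> [exact c2 ⟨hm, e, l⟩; exact c3 ⟨e, hm, l⟩])]
          ring

theorem pv_fold_items (b : List (Int × List Int)) (done : List Int) (k : Int)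
    (hd : done.Nodup) (hk : k ∉ done) :
    ∀ (zs ys : List Int) (st : PySem.Dict Int (List Int) × PySem.Dict (Int × Int) Int),
    (ys ++ zs).Nodup → pvInnerInv b done k ys st →
    pvInnerInv b done k (ys ++ zs) (zs.foldl (pvStepItem k) st) := by
  intro zs
  induction zs with
  | nil => intro ys st _ h; simpa using h
  | cons z zs ih =>
    intro ys st hnd h
    have hz : z ∉ ys := fun hm => (List.disjoint_of_nodup_append hnd) hm (by simp)
    have h1 := pv_step_item b done k z ys st hd hk hz h
    have h2 := ih (ys ++ [z]) (pvStepItem k st z) (by simpa using hnd) h1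
    simpa using h2

theorem pv_step_key (b : List (Int × List Int)) (done : List Int) (k : Int)
    (st : PySem.Dict Int (List Int) × PySem.Dict (Int × Int) Int)
    (hd : done.Nodup) (hk : k ∉ done) (h : pvInv b done st) :
    pvInv b (done ++ [k]) ((PySem.List.dedup (pvVal b k)).foldl (pvStepItem k) st) := by
  obtain ⟨h1, h2⟩ := h
  have h0 : pvInnerInv b done k [] st := by
    constructor
    · intro x; rw [h1 x]; simp
    · intro p
      rw [h2 p]
      unfold pvPC
      by_cases c1 : p.1 ∈ done ∧ p.2 ∈ done ∧ p.1 < p.2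
      · rw [if_pos c1, if_pos c1]
      · rw [if_neg c1, if_neg c1]
        by_cases c2 : p.1 ∈ done ∧ p.2 = k ∧ p.1 < k
        · rw [if_pos c2]; simp
        · rw [if_neg c2]
          by_cases c3 : p.1 = k ∧ p.2 ∈ done ∧ k < p.2
          · rw [if_pos c3]; simp
          · rw [if_neg c3]
  have hfin := pv_fold_items b done k hd hk (PySem.List.dedup (pvVal b k)) [] st
      (by simp) h0
  simp only [List.nil_append] at hfin
  obtain ⟨f1, f2⟩ := hfin
  constructor
  · intro x
    rw [f1 x, List.filter_append]
    by_cases hv : x ∈ pvVal b k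
    · simp [hv]
    · simp [hv]
  · intro p
    obtain ⟨p1, p2⟩ := p
    rw [f2 (p1, p2)]
    unfold pvPC
    by_cases c1 : p1 ∈ done ∧ p2 ∈ done ∧ p1 < p2
    · rw [if_pos c1,
          if_pos (show p1 ∈ done ++ [k] ∧ p2 ∈ done ++ [k] ∧ p1 < p2 by
            simp only [List.mem_append, List.mem_singleton]
            exact ⟨Or.inl c1.1, Or.inl c1.2.1, c1.2.2⟩)]
    · rw [if_neg c1]
      by_cases c2 : p1 ∈ done ∧ p2 = k ∧ p1 < k
      · rw [if_pos c2,
            if_pos (show p1 ∈ done ++ [k] ∧ p2 ∈ done ++ [k] ∧ p1 < p2 by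
              simp only [List.mem_append, List.mem_singleton]
              exact ⟨Or.inl c2.1, Or.inr c2.2.1, by rw [c2.2.1]; exact c2.2.2⟩)]
        rw [c2.2.1, pvC_comm b p1 k]
        rfl
      · rw [if_neg c2]
        by_cases c3 : p1 = k ∧ p2 ∈ done ∧ k < p2
        · rw [if_pos c3,
              if_pos (show p1 ∈ done ++ [k] ∧ p2 ∈ done ++ [k] ∧ p1 < p2 by
                simp only [List.mem_append, List.mem_singleton]
                exact ⟨Or.inr c3.1, Or.inl c3.2.1, by rw [c3.1]; exact c3.2.2⟩)]
          rw [c3.1]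
          rfl
        · rw [if_neg c3,
              if_neg (show ¬(p1 ∈ done ++ [k] ∧ p2 ∈ done ++ [k] ∧ p1 < p2) by
                simp only [List.mem_append, List.mem_singleton]
                rintro ⟨(m1|m1), (m2|m2), l⟩
                · exact c1 ⟨m1, m2, l⟩
                · exact c2 ⟨m1, m2, by rw [← m2]; exact l⟩
                · exact c3 ⟨m1, m2, by rw [← m1]; exact l⟩
                · exact absurd l (by rw [m1, m2]; exact lt_irrefl k))]

theorem pv_build (b : List (Int × List Int)) :
    ∀ (ks done : List Int) (st : PySem.Dict Int (List Int) × PySem.Dict (Int × Int) Int),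
    (done ++ ks).Nodup → pvInv b done st →
    pvInv b (done ++ ks)
      (ks.foldl (fun st k => (PySem.List.dedup (pvVal b k)).foldl (pvStepItem k) st) st) := by
  intro ks
  induction ks with
  | nil => intro done st _ h; simpa using h
  | cons k ks ih =>
    intro done st hnd h
    have hd : done.Nodup := hnd.of_append_left
    have hk : k ∉ done := fun hm => (List.disjoint_of_nodup_append hnd) hm (by simp)
    have h1 := pv_step_key b done k st hd hk h
    have h2 := ih (done ++ [k]) _ (by simpa using hnd) h1
    simpa using h2

theorem pv_inv_init (b : List (Int × List Int)) :
    pvInv b [] (PySem.Dict.empty, PySem.Dict.empty) := by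
  constructor
  · intro x; simp [PySem.Dict.getD_empty]
  · intro p; simp [PySem.Dict.getD_empty]

theorem find_same_basket_spec : Claim_equal_find_same_basket := by
  unfold Claim_equal_find_same_basket
  intro b s _
  unfold Spec_find_same_basket
  simp only [find_same_basket, find_same_basket_alt]
  have hks : (PySem.List.dedup (b.map Prod.fst)).Nodup := PySem.List.nodup_dedup _
  have hinv := pv_build b (PySem.List.dedup (b.map Prod.fst)) []
      (PySem.Dict.empty, PySem.Dict.empty) (by simp) (pv_inv_init b)
  simp only [List.nil_append] at hinv
  obtain ⟨_, h2⟩ := hinv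
  refine PySem.List.foldl_congr_mem _ _ _ _ ?_
  intro acc i hi
  refine PySem.List.foldl_congr_mem _ _ _ _ ?_
  intro acc2 j hj
  by_cases hij : i < j
  · rw [if_pos hij, if_pos hij, pv_inter_len b i j, h2 (i, j),
        if_pos (show (i, j).1 ∈ PySem.List.dedup (b.map Prod.fst)
            ∧ (i, j).2 ∈ PySem.List.dedup (b.map Prod.fst) ∧ (i, j).1 < (i, j).2
          from ⟨hi, hj, hij⟩)]
  · rw [if_neg hij, if_neg hij]
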